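-- pv_equiv track=rewrite | github.com/stevexyz/uLLM_Z80 | feedme.py | build_charset_from_pairs
-- ===== SOURCE A (Python) =====
-- from typing import List, Tuple
--
-- EOS_CHAR = '\x00'
--
-- def build_charset_from_pairs(pairs: List[Tuple[str, str]]) -> str:
--     """Build minimal charset from loaded query-response pairs."""
--     chars = set()
--     for query, response in pairs:
--         chars.update(response.upper())  # Normalize to uppercase
--
--     # Sort for consistency: space first, then A-Z, then 0-9, then punctuation
--     chars.discard(EOS_CHAR)  # Remove if present, we add it last
--
--     letters = sorted(c for c in chars if c.isalpha())
--     digits = sorted(c for c in chars if c.isdigit())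
--     space = [' '] if ' ' in chars else []
--     punct = sorted(c for c in chars if not c.isalnum() and c != ' ')
--
--     charset = ''.join(space + letters + digits + punct) + EOS_CHAR
--     return charset
-- ===== SOURCE B (Python) =====
-- EOS_CHAR = '\x00'
--
-- def build_charset_from_pairs(pairs):
--     """Build minimal charset from loaded query-response pairs."""
--     chars = {c for _, response in pairs for c in response.upper()}
--     chars.discard(EOS_CHAR)
--     key = lambda c: (0 if c == ' ' else 1 if c.isalpha() else 2 if c.isdigit() else 3, c)
--     return ''.join(sorted(chars, key=key)) + EOS_CHAR
-- ===== Notes on version B (the rewrite author's own statement) =====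
-- stated objective: idiomatic
-- what changed: Replaces the four separate category sublists (three sorts plus a space check, then concatenation) with a set comprehension and a single keyed sort whose tuple key (category, char) yields the same order.
import Mathlib
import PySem

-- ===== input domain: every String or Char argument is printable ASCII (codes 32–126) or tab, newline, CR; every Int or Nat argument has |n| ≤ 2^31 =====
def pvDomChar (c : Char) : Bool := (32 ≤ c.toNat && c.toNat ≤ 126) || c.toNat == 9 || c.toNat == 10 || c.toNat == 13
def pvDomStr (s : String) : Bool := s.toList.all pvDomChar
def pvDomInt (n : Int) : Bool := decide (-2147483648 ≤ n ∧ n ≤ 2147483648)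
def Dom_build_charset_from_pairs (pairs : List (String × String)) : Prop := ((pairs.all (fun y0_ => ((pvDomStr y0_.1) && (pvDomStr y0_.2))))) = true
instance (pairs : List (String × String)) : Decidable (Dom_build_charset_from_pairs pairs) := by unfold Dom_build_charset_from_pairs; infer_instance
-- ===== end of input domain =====

-- B replaces A's four category sublists (three sorts plus a space test) by one keyed sort
-- with tuple key (category, char) over the same uppercase char set (objective: idiomatic).

-- ===== PORT A =====
def build_charset_from_pairs (pairs : List (String × String)) : String :=
  let chars0 : PySem.Set Char :=
    pairs.foldl (fun s qr => PySem.Set.update s (PySem.Str.upper qr.2).toList) PySem.Set.empty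
  let chars : PySem.Set Char := PySem.Set.discard chars0 '\x00'
  let letters := PySem.List.sorted (chars.filter (fun c => PySem.Chars.isalpha c)) (fun c => c)
  let digits := PySem.List.sorted (chars.filter (fun c => PySem.Chars.isdigit c)) (fun c => c)
  let space := if PySem.Set.contains chars ' ' then [' '] else []
  let punct := PySem.List.sorted (chars.filter (fun c => !PySem.Chars.isalnum c && c != ' ')) (fun c => c)
  String.mk ((space ++ letters ++ digits ++ punct) ++ ['\x00'])

-- ===== PORT B =====
-- the first component of Source B's sort key (0 space, 1 letters, 2 digits, 3 rest)
def pvCat (c : Char) : Int :=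
  if c = ' ' then 0 else if PySem.Chars.isalpha c then 1 else if PySem.Chars.isdigit c then 2 else 3

def build_charset_from_pairs_alt (pairs : List (String × String)) : String :=
  let chars0 : PySem.Set Char :=
    PySem.Set.ofList (pairs.flatMap (fun qr => (PySem.Str.upper qr.2).toList))
  let chars : PySem.Set Char := PySem.Set.discard chars0 '\x00'
  String.mk (PySem.List.sorted2 chars pvCat (fun c => c) ++ ['\x00'])

-- ===== PRECONDITION & SPEC =====
def Spec_build_charset_from_pairs (pairs : List (String × String)) (out : String) : Prop := out = build_charset_from_pairs_alt pairs
instance (pairs : List (String × String)) (out : String) : Decidable (Spec_build_charset_from_pairs pairs out) := by unfold Spec_build_charset_from_pairs; infer_instance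

-- ===== CLAIM (what is proved, stated in full; the proofs are below) =====
def Claim_equal_build_charset_from_pairs : Prop := ∀ (pairs : List (String × String)), Dom_build_charset_from_pairs pairs → Spec_build_charset_from_pairs pairs (build_charset_from_pairs pairs)

-- ===== LEMMAS AND PROOFS =====

-- a single Int key realising Source B's lexicographic (category, char) tuple key
def pvK (c : Char) : Int := pvCat c * 4294967296 + (c.toNat : Int)

theorem pv_char_le_iff (a b : Char) : a ≤ b ↔ a.toNat ≤ b.toNat := by
  rw [Char.le_def, UInt32.le_iff_toNat_le]; rfl

theorem pv_char_lt_iff (a b : Char) : a < b ↔ a.toNat < b.toNat := by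
  rw [Char.lt_def, UInt32.lt_iff_toNat_lt]; rfl

theorem pv_toNat_lt (c : Char) : c.toNat < 4294967296 := c.val.toFin.isLt

theorem pvK_lt_of_cat_lt {a b : Char} (h : pvCat a < pvCat b) : pvK a < pvK b := by
  have ha := pv_toNat_lt a
  have hb := pv_toNat_lt b
  unfold pvK; omega

theorem pvK_lt_of_cat_eq_lt {a b : Char} (h : pvCat a = pvCat b) (h2 : a < b) : pvK a < pvK b := by
  rw [pv_char_lt_iff] at h2
  unfold pvK; omega

theorem pv_before_eq (a b : Char) :
    (decide (pvCat a < pvCat b) || (!decide (pvCat b < pvCat a) && decide (a < b))) = decide (pvK a < pvK b) := by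
  rcases lt_trichotomy (pvCat a) (pvCat b) with h | h | h
  · simp [h, pvK_lt_of_cat_lt h, not_lt_of_gt h]
  · have h1 : ¬ pvCat a < pvCat b := by omega
    have h2 : ¬ pvCat b < pvCat a := by omega
    by_cases h3 : a < b
    · simp [h1, h2, h3, pvK_lt_of_cat_eq_lt h h3]
    · have h4 : ¬ pvK a < pvK b := by
        rw [pv_char_lt_iff] at h3; unfold pvK; omega
      simp [h1, h2, h3, h4]
  · have h4 : ¬ pvK a < pvK b := not_lt.mpr (le_of_lt (pvK_lt_of_cat_lt h))
    simp [not_lt_of_gt h, h, h4]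

theorem pv_sorted2_eq (xs : List Char) :
    PySem.List.sorted2 xs pvCat (fun c => c) = PySem.List.sorted xs pvK := by
  have h : (fun a b : Char => decide (pvCat a < pvCat b) || (!decide (pvCat b < pvCat a) && decide (a < b)))
      = fun a b : Char => decide (pvK a < pvK b) := by
    funext a b; exact pv_before_eq a b
  simp only [PySem.List.sorted2, PySem.List.sorted, if_neg (by simp : ¬ (false = true))]
  rw [h]

theorem pv_foldl_update (pairs : List (String × String)) (s : PySem.Set Char) :
    pairs.foldl (fun s qr => PySem.Set.update s (PySem.Str.upper qr.2).toList) s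
      = PySem.Set.update s (pairs.flatMap fun qr => (PySem.Str.upper qr.2).toList) := by
  induction pairs generalizing s with
  | nil => simp [PySem.Set.update]
  | cons p t ih =>
    rw [List.foldl_cons, ih, List.flatMap_cons]
    simp [PySem.Set.update, List.foldl_append]

-- category facts
theorem pv_cat_space : pvCat ' ' = 0 := by decide

theorem pv_alpha_ne_space {c : Char} (h : PySem.Chars.isalpha c = true) : ¬ c = ' ' := by
  intro he; subst he; simp [PySem.Chars.isalpha, PySem.Chars.isupper, PySem.Chars.islower] at h

theorem pv_cat_of_alpha {c : Char} (h : PySem.Chars.isalpha c = true) : pvCat c = 1 := by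
  unfold pvCat; rw [if_neg (pv_alpha_ne_space h), if_pos h]

theorem pv_digit_not_alpha {c : Char} (h : PySem.Chars.isdigit c = true) :
    PySem.Chars.isalpha c = false := by
  simp only [PySem.Chars.isdigit, Bool.and_eq_true, decide_eq_true_eq, pv_char_le_iff] at h
  simp only [PySem.Chars.isalpha, PySem.Chars.isupper, PySem.Chars.islower, Bool.or_eq_false_iff,
    Bool.and_eq_false_iff, decide_eq_false_iff_not, pv_char_le_iff]
  have h48 : ('0' : Char).toNat = 48 := rfl
  have h57 : ('9' : Char).toNat = 57 := rfl
  have h65 : ('A' : Char).toNat = 65 := rfl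
  have h97 : ('a' : Char).toNat = 97 := rfl
  omega

theorem pv_digit_ne_space {c : Char} (h : PySem.Chars.isdigit c = true) : ¬ c = ' ' := by
  intro he; subst he; simp [PySem.Chars.isdigit] at h

theorem pv_cat_of_digit {c : Char} (h : PySem.Chars.isdigit c = true) : pvCat c = 2 := by
  unfold pvCat
  rw [if_neg (pv_digit_ne_space h), if_neg (by simp [pv_digit_not_alpha h]), if_pos h]

theorem pv_cat_of_punct {c : Char} (h : (!PySem.Chars.isalnum c && c != ' ') = true) : pvCat c = 3 := by
  simp only [Bool.and_eq_true, Bool.not_eq_true', bne_iff_ne, ne_eq] at h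
  obtain ⟨hna, hns⟩ := h
  simp only [PySem.Chars.isalnum, Bool.or_eq_false_iff] at hna
  unfold pvCat
  rw [if_neg hns, if_neg (by simp [hna.1]), if_neg (by simp [hna.2])]

theorem pv_cat_cases (c : Char) : pvCat c = 0 ∨ pvCat c = 1 ∨ pvCat c = 2 ∨ pvCat c = 3 := by
  unfold pvCat; split_ifs <;> simp

-- the four pvCat-indexed filters are a permutation of the list
theorem pv_filter_cat_perm (l : List Char) :
    (l.filter (fun c => pvCat c == 0) ++ l.filter (fun c => pvCat c == 1)
      ++ l.filter (fun c => pvCat c == 2) ++ l.filter (fun c => pvCat c == 3)).Perm l := by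
  rw [List.perm_iff_count]
  intro a
  have hcf : ∀ (k : Int), List.count a (l.filter (fun c => pvCat c == k))
      = if pvCat a = k then List.count a l else 0 := by
    intro k
    by_cases h : pvCat a = k
    · rw [if_pos h, List.count_filter (by simp [h])]
    · rw [if_neg h, List.count_eq_zero]
      intro hmem
      exact h (by simpa using List.of_mem_filter hmem)
  simp only [List.count_append, hcf]
  rcases pv_cat_cases a with h | h | h | h <;> simp [h]

-- translate the port's filters to pvCat filters
theorem pv_filter_space (l : List Char) (hnd : l.Nodup) :
    (if PySem.Set.contains l ' ' then [' '] else []) = l.filter (fun c => pvCat c == 0) := by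
  have he : l.filter (fun c => pvCat c == 0) = l.filter (fun c => c == ' ') := by
    apply List.filter_congr
    intro c _
    rcases eq_or_ne c ' ' with h | h
    · subst h; simp [pv_cat_space]
    · have : pvCat c ≠ 0 := by unfold pvCat; split_ifs with h1 h2 h3 <;> simp_all
      simp [h, this]
  rw [he, List.filter_beq ' ']
  have hc := (List.nodup_iff_count_le_one.mp hnd) ' '
  by_cases hm : (' ' : Char) ∈ l
  · have h1 : List.count ' ' l = 1 := le_antisymm hc (List.count_pos_iff.mpr hm)
    simp [PySem.Set.contains, hm, h1]
  · have h0 : List.count ' ' l = 0 := by simpa using List.count_eq_zero_of_not_mem hm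
    simp [PySem.Set.contains, hm, h0]

theorem pv_filter_alpha (l : List Char) :
    l.filter (fun c => PySem.Chars.isalpha c) = l.filter (fun c => pvCat c == 1) := by
  apply List.filter_congr
  intro c _
  by_cases h : PySem.Chars.isalpha c = true
  · simp [h, pv_cat_of_alpha h]
  · have : pvCat c ≠ 1 := by unfold pvCat; split_ifs <;> simp_all
    simp_all

theorem pv_filter_digit (l : List Char) :
    l.filter (fun c => PySem.Chars.isdigit c) = l.filter (fun c => pvCat c == 2) := by
  apply List.filter_congr
  intro c _
  by_cases h : PySem.Chars.isdigit c = true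
  · simp [h, pv_cat_of_digit h]
  · have : pvCat c ≠ 2 := by unfold pvCat; split_ifs <;> simp_all
    simp_all

theorem pv_filter_punct (l : List Char) :
    l.filter (fun c => !PySem.Chars.isalnum c && c != ' ') = l.filter (fun c => pvCat c == 3) := by
  apply List.filter_congr
  intro c _
  by_cases h : (!PySem.Chars.isalnum c && c != ' ') = true
  · simp only [h, pv_cat_of_punct h]; simp
  · have hf : (!PySem.Chars.isalnum c && c != ' ') = false := by
      simpa using h
    have h' : PySem.Chars.isalnum c = true ∨ c = ' ' := by
      rcases Bool.and_eq_false_iff.mp hf with h' | h'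
      · exact Or.inl (by simpa using h')
      · exact Or.inr (by simpa using h')
    have hne : pvCat c ≠ 3 := by
      unfold pvCat
      rcases h' with h' | h'
      · simp only [PySem.Chars.isalnum, Bool.or_eq_true] at h'
        split_ifs with h1 h2 h3 <;> simp_all
      · simp [h']
    simp [hf, hne]

-- a sorted (by identity) block of a nodup filter is strictly pvK-increasing when all its
-- elements share one category
theorem pv_block_pairwise {l : List Char} (hnd : l.Nodup) (p : Char → Bool) (k : Int)
    (hk : ∀ c, p c = true → pvCat c = k) :
    List.Pairwise (fun a b => pvK a < pvK b) (PySem.List.sorted (l.filter p) (fun c => c)) := by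
  have hle : List.Pairwise (fun a b : Char => a ≤ b) (PySem.List.sorted (l.filter p) (fun c => c)) :=
    PySem.List.sorted_pairwise (l.filter p) (fun c => c)
  have hnd2 : (PySem.List.sorted (l.filter p) (fun c => c)).Nodup :=
    ((PySem.List.sorted_perm (l.filter p) (fun c => c) false).nodup_iff).mpr (hnd.filter p)
  have hlt : List.Pairwise (fun a b : Char => a < b) (PySem.List.sorted (l.filter p) (fun c => c)) :=
    (hle.and hnd2).imp (fun h => lt_of_le_of_ne h.1 h.2)
  refine List.Pairwise.imp_of_mem ?_ hlt
  intro a b ha hb hab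
  have ha' := hk a (List.of_mem_filter (((PySem.List.mem_sorted _ _ _ _).mp ha)))
  have hb' := hk b (List.of_mem_filter (((PySem.List.mem_sorted _ _ _ _).mp hb)))
  exact pvK_lt_of_cat_eq_lt (ha'.trans hb'.symm) hab

theorem pv_mem_block_cat {l : List Char} {c : Char} (p : Char → Bool) (k : Int)
    (hk : ∀ c, p c = true → pvCat c = k)
    (h : c ∈ PySem.List.sorted (l.filter p) (fun c => c)) : pvCat c = k :=
  hk c (List.of_mem_filter ((PySem.List.mem_sorted _ _ _ _).mp h))

-- the main structural lemma: the single pvK-keyed sort is A's block concatenation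
theorem pv_blocks (l : List Char) (hnd : l.Nodup) :
    PySem.List.sorted l pvK =
      (if PySem.Set.contains l ' ' then [' '] else [])
        ++ PySem.List.sorted (l.filter fun c => PySem.Chars.isalpha c) (fun c => c)
        ++ PySem.List.sorted (l.filter fun c => PySem.Chars.isdigit c) (fun c => c)
        ++ PySem.List.sorted (l.filter fun c => !PySem.Chars.isalnum c && c != ' ') (fun c => c) := by
  apply PySem.List.sorted_eq_of_perm_of_pairwise_lt
  · -- permutation
    rw [pv_filter_space l hnd]
    refine List.Perm.trans ?_ (pv_filter_cat_perm l)
    refine (((List.Perm.refl _).append ?_).append ?_).append ?_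
    · rw [pv_filter_alpha]; exact PySem.List.sorted_perm _ _ _
    · rw [pv_filter_digit]; exact PySem.List.sorted_perm _ _ _
    · rw [pv_filter_punct]; exact PySem.List.sorted_perm _ _ _
  · -- strictly increasing under pvK
    have hmemsp : ∀ c ∈ (if PySem.Set.contains l ' ' then [' '] else ([] : List Char)), pvCat c = 0 := by
      intro c hc
      split at hc
      · simp at hc; subst hc; exact pv_cat_space
      · simp at hc
    have hA := pv_block_pairwise hnd (fun c => PySem.Chars.isalpha c) 1 (fun c h => pv_cat_of_alpha h)
    have hD := pv_block_pairwise hnd (fun c => PySem.Chars.isdigit c) 2 (fun c h => pv_cat_of_digit h)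
    have hP := pv_block_pairwise hnd (fun c => !PySem.Chars.isalnum c && c != ' ') 3
      (fun c h => pv_cat_of_punct h)
    simp only [List.pairwise_append]
    refine ⟨⟨⟨?_, hA, ?_⟩, hD, ?_⟩, hP, ?_⟩
    · split
      · simp
      · simp
    · intro a ha b hb
      exact pvK_lt_of_cat_lt (by
        rw [hmemsp a ha,
          pv_mem_block_cat (fun c => PySem.Chars.isalpha c) 1 (fun c h => pv_cat_of_alpha h) hb]
        norm_num)
    · intro a ha b hb
      rcases List.mem_append.mp ha with ha | ha
      · exact pvK_lt_of_cat_lt (by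
          rw [hmemsp a ha,
            pv_mem_block_cat (fun c => PySem.Chars.isdigit c) 2 (fun c h => pv_cat_of_digit h) hb]
          norm_num)
      · exact pvK_lt_of_cat_lt (by
          rw [pv_mem_block_cat (fun c => PySem.Chars.isalpha c) 1 (fun c h => pv_cat_of_alpha h) ha,
            pv_mem_block_cat (fun c => PySem.Chars.isdigit c) 2 (fun c h => pv_cat_of_digit h) hb]
          norm_num)
    · intro a ha b hb
      have hb3 : pvCat b = 3 :=
        pv_mem_block_cat (fun c => !PySem.Chars.isalnum c && c != ' ') 3
          (fun c h => pv_cat_of_punct h) hb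
      rcases List.mem_append.mp ha with ha | ha
      · rcases List.mem_append.mp ha with ha | ha
        · exact pvK_lt_of_cat_lt (by rw [hmemsp a ha, hb3]; norm_num)
        · exact pvK_lt_of_cat_lt (by
            rw [pv_mem_block_cat (fun c => PySem.Chars.isalpha c) 1 (fun c h => pv_cat_of_alpha h) ha,
              hb3]
            norm_num)
      · exact pvK_lt_of_cat_lt (by
          rw [pv_mem_block_cat (fun c => PySem.Chars.isdigit c) 2 (fun c h => pv_cat_of_digit h) ha,
            hb3]
          norm_num)

-- ===== VERDICT (by name: the statement is the Claim_ definition above) =====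
theorem build_charset_from_pairs_spec : Claim_equal_build_charset_from_pairs := by
  intro pairs _
  unfold Spec_build_charset_from_pairs build_charset_from_pairs build_charset_from_pairs_alt
  simp only []
  rw [show (PySem.Set.empty : PySem.Set Char) = [] from rfl] at *
  rw [pv_foldl_update pairs [], PySem.Set.update_nil_left]
  set l := PySem.Set.discard
    (PySem.Set.ofList (pairs.flatMap fun qr => (PySem.Str.upper qr.2).toList)) '\x00' with hl
  have hnd : l.Nodup := by
    rw [hl]
    exact (PySem.Set.nodup_ofList _).filter _
  rw [pv_sorted2_eq, pv_blocks l hnd]
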